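-- pv_equiv track=rewrite | github.com/guerler/springsuite | spring_mcc.py | randomPairs
-- ===== SOURCE A (Python) =====
-- def randomPairs(iLen, jLen, jSize):
--     i = 0
--     jStart = 0
--     while i < iLen:
--         jMax = min(jStart + jSize, jLen)
--         for j in range(jStart, jMax):
--             yield i, j
--         i = i + 1
--         if i == iLen and jMax < jLen:
--             i = 0
--             jStart = jStart + jSize + 1
-- ===== SOURCE B (Python) =====
-- def randomPairs(iLen, jLen, jSize):
--     # Arithmetic characterization: the yielded columns are exactly the j in
--     # [0, jLen) with j % (jSize+1) != jSize; emit them in chunks of jSize.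
--     if iLen <= 0 or jSize <= 0:
--         return
--     m = jSize + 1
--     cols = [j for j in range(jLen) if j % m != jSize]
--     while cols:
--         chunk, cols = cols[:jSize], cols[jSize:]
--         for i in range(iLen):
--             for j in chunk:
--                 yield i, j
-- ===== Notes on version B (the rewrite author's own statement) =====
-- stated objective: alternative
-- what changed: Replaced A's while-loop state machine (row counter with end-of-pass reset, advancing window start, per-stripe min computation) by an arithmetic characterization: the emitted columns are exactly the j in [0,jLen) with j % (jSize+1) != jSize, so B builds that filtered column list once and then emits it chunk by chunk (cols[:jSize] / cols[jSize:]) crossed with the rows; no window bounds or reset logic remain.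
import Mathlib
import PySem

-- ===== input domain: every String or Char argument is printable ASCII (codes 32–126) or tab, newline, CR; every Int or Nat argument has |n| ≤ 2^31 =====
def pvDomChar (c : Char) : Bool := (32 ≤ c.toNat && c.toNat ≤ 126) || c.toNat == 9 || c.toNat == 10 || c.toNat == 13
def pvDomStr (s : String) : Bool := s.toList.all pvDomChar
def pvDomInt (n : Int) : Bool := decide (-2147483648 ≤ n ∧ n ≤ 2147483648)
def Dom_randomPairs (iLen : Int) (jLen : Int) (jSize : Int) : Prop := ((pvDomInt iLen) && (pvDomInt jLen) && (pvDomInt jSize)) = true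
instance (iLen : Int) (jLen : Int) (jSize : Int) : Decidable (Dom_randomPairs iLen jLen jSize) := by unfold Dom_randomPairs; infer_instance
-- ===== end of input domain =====

-- B replaces A's windowed state machine by an arithmetic characterization of the emitted
-- columns (j % (jSize+1) != jSize) filtered once and emitted in jSize-chunks; objective: alternative.
-- Both Pythons are generators; the ports return the list of all yielded pairs.

-- ===== PORT A =====
-- A's while loop over state (i, jStart); fuel makes the recursion total (A diverges outside Pre_,
-- and under Pre_ the chosen fuel is enough — proved below).
def randomPairsLoop (iLen jLen jSize : Int) : Nat → Int → Int → List (Int × Int) → List (Int × Int)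
  | 0, _, _, acc => acc
  | fuel + 1, i, jStart, acc =>
    if i < iLen then
      let jMax := min (jStart + jSize) jLen
      let chunk := (PySem.List.pyRange jStart jMax 1).map (fun j => (i, j))
      if i + 1 = iLen ∧ jMax < jLen then
        randomPairsLoop iLen jLen jSize fuel 0 (jStart + jSize + 1) (acc ++ chunk)
      else
        randomPairsLoop iLen jLen jSize fuel (i + 1) jStart (acc ++ chunk)
    else acc

def randomPairs (iLen : Int) (jLen : Int) (jSize : Int) : List (Int × Int) :=
  randomPairsLoop iLen jLen jSize (iLen.toNat * (jLen.toNat + 1)) 0 0 []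

-- ===== PORT B =====
-- B's 'while cols:' loop: emit rows × cols[:jSize], continue on cols[jSize:].
-- Fuel = cols.length (each iteration consumes ≥ 1 element since jSize ≥ 1 under B's guard).
def randomPairsChunk (iLen jSize : Int) : Nat → List Int → List (Int × Int)
  | _, [] => []
  | 0, _ :: _ => []
  | fuel + 1, c :: rest =>
      ((PySem.List.pyRange 0 iLen 1).flatMap
        (fun i => (PySem.List.slice (c :: rest) (some 0) (some jSize)).map (fun j => (i, j))))
      ++ randomPairsChunk iLen jSize fuel (PySem.List.slice (c :: rest) (some jSize) none)

def randomPairs_alt (iLen : Int) (jLen : Int) (jSize : Int) : List (Int × Int) :=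
  if iLen ≤ 0 ∨ jSize ≤ 0 then []
  else
    let m := jSize + 1
    let cols := (PySem.List.pyRange 0 jLen 1).filter (fun j => PySem.Int.mod j m != jSize)
    randomPairsChunk iLen jSize cols.length cols

-- ===== PRECONDITION & SPEC =====
-- Pre_ excludes exactly the inputs on which Python A (and hence the generator) loops forever:
-- iLen > 0 with a negative jSize still below jLen makes the reset increment jStart + jSize + 1 nonpositive.
def Pre_randomPairs (iLen : Int) (jLen : Int) (jSize : Int) : Prop :=
  iLen ≤ 0 ∨ 0 ≤ jSize ∨ jLen ≤ jSize
instance (iLen : Int) (jLen : Int) (jSize : Int) : Decidable (Pre_randomPairs iLen jLen jSize) := by unfold Pre_randomPairs; infer_instance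

def pvWitness_randomPairs : Int × Int × Int := (3, 7, 2)

def Spec_randomPairs (iLen : Int) (jLen : Int) (jSize : Int) (out : List (Int × Int)) : Prop := out = randomPairs_alt iLen jLen jSize
instance (iLen : Int) (jLen : Int) (jSize : Int) (out : List (Int × Int)) : Decidable (Spec_randomPairs iLen jLen jSize out) := by unfold Spec_randomPairs; infer_instance

-- ===== CLAIM (what is proved, stated in full; the proofs are below) =====
def Claim_equal_randomPairs : Prop := ∀ (iLen : Int) (jLen : Int) (jSize : Int), Dom_randomPairs iLen jLen jSize → Pre_randomPairs iLen jLen jSize → Spec_randomPairs iLen jLen jSize (randomPairs iLen jLen jSize)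

-- ===== LEMMAS AND PROOFS =====

-- proof-side abbreviation: B's column list, started from an arbitrary left end t
def filterCols (jLen jSize t : Int) : List Int :=
  (PySem.List.pyRange t jLen 1).filter (fun j => PySem.Int.mod j (jSize + 1) != jSize)

-- A's accumulator only prepends: pull it out
lemma loop_acc (iLen jLen jSize : Int) :
    ∀ (fa : Nat) (i jStart : Int) (acc : List (Int × Int)),
    randomPairsLoop iLen jLen jSize fa i jStart acc =
      acc ++ randomPairsLoop iLen jLen jSize fa i jStart [] := by
  intro fa
  induction fa with
  | zero => intro i jStart acc; simp [randomPairsLoop]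
  | succ n ih =>
    intro i jStart acc
    rw [randomPairsLoop, randomPairsLoop]
    by_cases hi : i < iLen
    · simp only [if_pos hi]
      split_ifs <;> rw [ih _ _ (acc ++ _), ih _ _ ([] ++ _)] <;> simp
    · simp [hi]

-- once i has reached iLen, A's loop stops, whatever the fuel
lemma loop_done (iLen jLen jSize : Int) (fa : Nat) (jStart : Int) :
    randomPairsLoop iLen jLen jSize fa iLen jStart [] = [] := by
  cases fa with
  | zero => rfl
  | succ n => simp [randomPairsLoop]

-- when jSize ≤ 0 every window is empty and A yields nothing
lemma loop_empty (iLen jLen jSize : Int) (hS : jSize ≤ 0) :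
    ∀ (fa : Nat) (i jStart : Int) (acc : List (Int × Int)),
    randomPairsLoop iLen jLen jSize fa i jStart acc = acc := by
  intro fa
  induction fa with
  | zero => intro i jStart acc; rfl
  | succ n ih =>
    intro i jStart acc
    rw [randomPairsLoop]
    by_cases hi : i < iLen
    · have hnil : PySem.List.pyRange jStart (min (jStart + jSize) jLen) 1 = [] :=
        PySem.List.pyRange_one_eq_nil (by omega)
      simp only [if_pos hi, hnil, List.map_nil, List.append_nil]
      split_ifs <;> exact ih _ _ _
    · simp [hi]

-- one full pass of A's loop over i (from i up to iLen) emits one stripe,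
-- followed by the reset call exactly when jMax < jLen
lemma pass_lemma (iLen jLen jSize : Int) (m : Nat) :
    ∀ (fa : Nat) (i jStart : Int), i + m = iLen → 0 < m →
    randomPairsLoop iLen jLen jSize (fa + m) i jStart [] =
      (PySem.List.pyRange i iLen 1).flatMap
        (fun i' => (PySem.List.pyRange jStart (min (jStart + jSize) jLen) 1).map (fun j => (i', j)))
      ++ (if min (jStart + jSize) jLen < jLen then
            randomPairsLoop iLen jLen jSize fa 0 (jStart + jSize + 1) [] else []) := by
  induction m with
  | zero => intro _ _ _ _ h; omega
  | succ k ih =>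
    intro fa i jStart hsum _
    have hi : i < iLen := by omega
    rw [show fa + (k + 1) = (fa + k) + 1 from rfl]
    rw [randomPairsLoop]
    simp only [if_pos hi]
    by_cases hk : k = 0
    · subst hk
      have hil : i + 1 = iLen := by omega
      have hr : PySem.List.pyRange i iLen 1 = [i] := by
        rw [← hil]; exact PySem.List.pyRange_one_singleton i
      simp only [hr, List.flatMap_cons, List.flatMap_nil, List.append_nil]
      by_cases hj : min (jStart + jSize) jLen < jLen
      · simp only [hil, hj, and_self, if_true]
        rw [loop_acc]; simp
      · simp only [hil, hj, and_false, if_false]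
        rw [loop_acc, loop_done]; simp
    · have hne : ¬ (i + 1 = iLen ∧ min (jStart + jSize) jLen < jLen) := by
        intro h; omega
      simp only [if_neg hne]
      rw [loop_acc, List.nil_append,
        ih (fa := fa) (i := i + 1) (jStart := jStart) (by omega) (by omega)]
      rw [PySem.List.pyRange_one_cons hi]
      simp [List.append_assoc]

-- B's chunk loop on the empty list, whatever the fuel
lemma chunk_nil (iLen jSize : Int) (fa : Nat) :
    randomPairsChunk iLen jSize fa [] = [] := by
  cases fa <;> rfl

-- B's chunk loop, unfolded once on a nonempty list
lemma chunk_cons (iLen jSize : Int) (fa : Nat) (cols : List Int) (h : cols ≠ []) :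
    randomPairsChunk iLen jSize (fa + 1) cols =
      ((PySem.List.pyRange 0 iLen 1).flatMap
        (fun i => (PySem.List.slice cols (some 0) (some jSize)).map (fun j => (i, j))))
      ++ randomPairsChunk iLen jSize fa (PySem.List.slice cols (some jSize) none) := by
  obtain ⟨c, rest, rfl⟩ := List.exists_cons_of_ne_nil h
  rfl

-- for j inside a stripe starting at a multiple of jSize+1, Python's j % (jSize+1) is j - jStart
lemma mod_in_stripe (jSize jStart j : Int) (hS : 1 ≤ jSize) (hd : (jSize + 1) ∣ jStart)
    (h1 : jStart ≤ j) (h2 : j < jStart + jSize + 1) :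
    PySem.Int.mod j (jSize + 1) = j - jStart := by
  obtain ⟨q, hq⟩ := hd
  rw [PySem.Int.mod_eq_emod_of_pos (by omega)]
  have hsplit : j % (jSize + 1) = (j - jStart) % (jSize + 1) := by
    conv_lhs => rw [show j = (j - jStart) + (jSize + 1) * q by rw [hq]; ring]
    rw [Int.add_mul_emod_self_left]
  rw [hsplit, Int.emod_eq_of_lt (by omega) (by omega)]

-- the column list decomposes stripe by stripe
lemma cols_decomp (jLen jSize jStart : Int) (hS : 1 ≤ jSize) (hd : (jSize + 1) ∣ jStart) :
    filterCols jLen jSize jStart =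
      PySem.List.pyRange jStart (min (jStart + jSize) jLen) 1
        ++ filterCols jLen jSize (jStart + (jSize + 1)) := by
  have keep : ∀ j, jStart ≤ j → j < jStart + jSize →
      (PySem.Int.mod j (jSize + 1) != jSize) = true := by
    intro j hj1 hj2
    rw [mod_in_stripe jSize jStart j hS hd hj1 (by omega)]
    simp only [bne_iff_ne, ne_eq]
    omega
  by_cases hc : jStart + (jSize + 1) ≤ jLen
  · unfold filterCols
    rw [PySem.List.pyRange_one_append jStart (jStart + jSize) jLen (by omega) (by omega),
        PySem.List.pyRange_one_append (jStart + jSize) (jStart + (jSize + 1)) jLen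
          (by omega) (by omega),
        show jStart + (jSize + 1) = (jStart + jSize) + 1 by ring,
        PySem.List.pyRange_one_singleton]
    rw [List.filter_append, List.filter_append]
    have h1 : (PySem.List.pyRange jStart (jStart + jSize) 1).filter
        (fun j => PySem.Int.mod j (jSize + 1) != jSize) =
        PySem.List.pyRange jStart (jStart + jSize) 1 := by
      apply List.filter_eq_self.mpr
      intro j hj
      rw [PySem.List.mem_pyRange_one] at hj
      exact keep j hj.1 hj.2
    have h2 : ([jStart + jSize] : List Int).filter
        (fun j => PySem.Int.mod j (jSize + 1) != jSize) = [] := by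
      simp only [List.filter_cons, List.filter_nil]
      rw [mod_in_stripe jSize jStart (jStart + jSize) hS hd (by omega) (by omega)]
      simp
    rw [h1, h2, min_eq_left (by omega)]
    simp [show (jStart + jSize) + 1 = jStart + (jSize + 1) by ring]
  · have hmin : min (jStart + jSize) jLen = jLen := min_eq_right (by omega)
    have h2 : filterCols jLen jSize (jStart + (jSize + 1)) = [] := by
      unfold filterCols
      rw [PySem.List.pyRange_one_eq_nil (by omega)]
      rfl
    rw [hmin, h2, List.append_nil]
    unfold filterCols
    apply List.filter_eq_self.mpr
    intro j hj
    rw [PySem.List.mem_pyRange_one] at hj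
    exact keep j hj.1 (by omega)

-- the two loops agree stripe by stripe
lemma main_lemma (iLen jLen jSize : Int) (hI : 0 < iLen) (hS : 1 ≤ jSize) :
    ∀ (n : Nat) (jStart : Int) (fa : Nat), 0 ≤ jStart → (jSize + 1) ∣ jStart →
    jLen - jStart ≤ (n : Int) → (filterCols jLen jSize jStart).length ≤ fa →
    randomPairsLoop iLen jLen jSize (iLen.toNat * (n + 1)) 0 jStart [] =
      randomPairsChunk iLen jSize fa (filterCols jLen jSize jStart) := by
  intro n
  induction n with
  | zero =>
    intro jStart fa h0 hd hn hfa
    rw [show iLen.toNat * (0 + 1) = 0 + iLen.toNat by ring]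
    rw [pass_lemma iLen jLen jSize iLen.toNat 0 0 jStart (by omega) (by omega)]
    have hmin : min (jStart + jSize) jLen = jLen := min_eq_right (by omega)
    rw [cols_decomp jLen jSize jStart hS hd]
    have hnil : PySem.List.pyRange jStart (min (jStart + jSize) jLen) 1 = [] := by
      rw [hmin]; exact PySem.List.pyRange_one_eq_nil (by omega)
    have hnil2 : filterCols jLen jSize (jStart + (jSize + 1)) = [] := by
      unfold filterCols
      rw [PySem.List.pyRange_one_eq_nil (by omega)]; rfl
    rw [hnil, hnil2]
    simp [chunk_nil, hmin]
  | succ n' ih =>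
    intro jStart fa h0 hd hn hfa
    rw [show iLen.toNat * (n' + 1 + 1) = iLen.toNat * (n' + 1) + iLen.toNat by ring]
    rw [pass_lemma iLen jLen jSize iLen.toNat (iLen.toNat * (n' + 1)) 0 jStart (by omega) (by omega)]
    rw [cols_decomp jLen jSize jStart hS hd] at hfa ⊢
    set R := PySem.List.pyRange jStart (min (jStart + jSize) jLen) 1 with hR
    set cols' := filterCols jLen jSize (jStart + (jSize + 1)) with hcols'
    by_cases hb : jStart + jSize < jLen
    · -- full stripe, reset fires
      have hminl : min (jStart + jSize) jLen = jStart + jSize := min_eq_left (by omega)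
      have hRlen : R.length = jSize.toNat := by
        rw [hR, PySem.List.length_pyRange_one, hminl]; omega
      have hlen : (R ++ cols').length = jSize.toNat + cols'.length := by
        simp [hRlen]
      have hfa1 : 1 ≤ fa := by
        rw [hlen] at hfa; omega
      obtain ⟨fa', rfl⟩ : ∃ fa', fa = fa' + 1 := ⟨fa - 1, by omega⟩
      have hRnil : R ≠ [] := by
        intro h
        rw [h] at hRlen
        simp at hRlen
        omega
      rw [chunk_cons iLen jSize fa' (R ++ cols') (by simp [hRnil])]
      have htake : PySem.List.slice (R ++ cols') (some 0) (some jSize) = R := by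
        rw [PySem.List.slice_zero_start, PySem.List.slice_to _ (by omega)]
        exact List.take_left' hRlen
      have hdrop : PySem.List.slice (R ++ cols') (some jSize) none = cols' := by
        rw [PySem.List.slice_from _ (by omega)]
        exact List.drop_left' hRlen
      rw [htake, hdrop]
      rw [if_pos (by omega)]
      congr 1
      rw [show jStart + jSize + 1 = jStart + (jSize + 1) by ring]
      rw [ih (jStart + (jSize + 1)) fa' (by omega) (Dvd.dvd.add hd ⟨1, by ring⟩)
        (by omega) (by rw [hlen] at hfa; rw [← hcols']; omega)]
    · -- last (possibly partial) stripe
      have hminr : min (jStart + jSize) jLen = jLen := min_eq_right (by omega)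
      have hnil2 : cols' = [] := by
        rw [hcols']
        unfold filterCols
        rw [PySem.List.pyRange_one_eq_nil (by omega)]; rfl
      rw [if_neg (by omega), List.append_nil, hnil2, List.append_nil]
      by_cases hRnil : R = []
      · rw [hRnil, chunk_nil]
        simp
      · have hRlen : R.length ≤ jSize.toNat := by
          rw [hR, PySem.List.length_pyRange_one, hminr]; omega
        have hfa1 : 1 ≤ fa := by
          rw [hnil2, List.append_nil] at hfa
          have := List.length_pos_iff.mpr hRnil
          omega
        obtain ⟨fa', rfl⟩ : ∃ fa', fa = fa' + 1 := ⟨fa - 1, by omega⟩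
        rw [chunk_cons iLen jSize fa' R hRnil]
        have htake : PySem.List.slice R (some 0) (some jSize) = R := by
          rw [PySem.List.slice_zero_start, PySem.List.slice_to _ (by omega)]
          exact List.take_of_length_le hRlen
        have hdrop : PySem.List.slice R (some jSize) none = [] := by
          rw [PySem.List.slice_from _ (by omega)]
          exact List.drop_eq_nil_of_le hRlen
        rw [htake, hdrop, chunk_nil, List.append_nil]

-- ===== VERDICT (by name: the statement is the Claim_ definition above) =====
theorem randomPairs_spec : Claim_equal_randomPairs := by
  intro iLen jLen jSize _ hPre
  unfold Spec_randomPairs randomPairs randomPairs_alt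
  by_cases hI : iLen ≤ 0
  · have h0 : iLen.toNat = 0 := by omega
    simp [h0, hI, randomPairsLoop]
  · have hI' : 0 < iLen := by omega
    by_cases hZ : jSize ≤ 0
    · rw [loop_empty iLen jLen jSize hZ]
      rw [if_pos (Or.inr hZ)]
    · rw [if_neg (by omega)]
      have hS : 1 ≤ jSize := by omega
      exact main_lemma iLen jLen jSize hI' hS jLen.toNat 0
        ((filterCols jLen jSize 0).length) le_rfl ⟨0, by ring⟩ (by omega) le_rfl
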